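-- pv_equiv track=rewrite | github.com/Pkpallaw16/Recursion-and-backtraking | 27 Max Score.py | check_word_in_limit_of_freq
-- ===== SOURCE A (Python) =====
-- def check_word_in_limit_of_freq(word,fre_count):
--     flag=True
--     for ch in word:
--         index=ord(ch)-ord("a")
--         if fre_count[index]<=0:
--             flag=False
--         fre_count[index]-=1
--     return flag
-- ===== SOURCE B (Python) =====
-- def check_word_in_limit_of_freq(word, fre_count):
--     counts = {}
--     for ch in word:
--         counts[ch] = counts.get(ch, 0) + 1
--     flag = True
--     for ch, c in counts.items():
--         index = ord(ch) - ord("a")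
--         if fre_count[index] < c:
--             flag = False
--         fre_count[index] -= c
--     return flag
-- ===== Notes on version B (the rewrite author's own statement) =====
-- stated objective: alternative
-- what changed: B first builds a dict of per-character occurrence counts in one pass and then performs a single aggregate check-and-decrement per distinct character, instead of A's per-character check-and-decrement on every occurrence.
import Mathlib
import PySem

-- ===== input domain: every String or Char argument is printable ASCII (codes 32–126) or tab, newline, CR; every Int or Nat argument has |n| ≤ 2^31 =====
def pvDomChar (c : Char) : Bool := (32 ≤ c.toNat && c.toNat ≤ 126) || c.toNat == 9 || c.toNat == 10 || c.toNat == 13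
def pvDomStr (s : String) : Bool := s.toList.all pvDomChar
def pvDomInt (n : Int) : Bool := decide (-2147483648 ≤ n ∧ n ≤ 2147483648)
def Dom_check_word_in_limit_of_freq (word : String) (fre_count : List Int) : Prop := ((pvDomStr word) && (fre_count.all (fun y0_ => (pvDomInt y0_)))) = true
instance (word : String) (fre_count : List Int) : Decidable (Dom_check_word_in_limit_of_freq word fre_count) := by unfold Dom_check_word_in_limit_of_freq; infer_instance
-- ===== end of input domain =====

-- B replaces A's per-character check-and-decrement scan by a counter built first and one
-- aggregate check/decrement per distinct character (objective: alternative decomposition).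
-- Both A and B mutate fre_count in place identically; the equivalence proved is about the return value.


-- ===== PORT A =====
-- one step of A's loop body: read fre_count[index], clear the flag if ≤ 0, decrement in place
def pvAStep (st : Bool × List Int) (ch : Char) : Bool × List Int :=
  let index : Int := (ch.toNat : Int) - 97
  let flag := if PySem.List.pyGetD st.2 index 0 ≤ 0 then false else st.1
  (flag, PySem.List.pySetD st.2 index (PySem.List.pyGetD st.2 index 0 - 1))

def check_word_in_limit_of_freq (word : String) (fre_count : List Int) : Bool :=
  (word.toList.foldl pvAStep (true, fre_count)).1

-- ===== PORT B =====
-- counts[ch] = counts.get(ch, 0) + 1 over the word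
def pvBCounter (cs : List Char) : PySem.Dict Char Int :=
  cs.foldl (fun d ch => d.insert ch (d.getD ch 0 + 1)) PySem.Dict.empty

-- one step of B's loop over counts.items(): aggregate check and aggregate decrement
def pvBStep (st : Bool × List Int) (p : Char × Int) : Bool × List Int :=
  let index : Int := (p.1.toNat : Int) - 97
  let v := PySem.List.pyGetD st.2 index 0
  (if v < p.2 then false else st.1, PySem.List.pySetD st.2 index (v - p.2))

def check_word_in_limit_of_freq_alt (word : String) (fre_count : List Int) : Bool :=
  ((pvBCounter word.toList).items.foldl pvBStep (true, fre_count)).1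

-- ===== PRECONDITION & SPEC =====
-- Pre_ excludes exactly the inputs where A raises IndexError: some character's index
-- ord(ch) - ord('a') falls outside Python's valid index range for fre_count.
def Pre_check_word_in_limit_of_freq (word : String) (fre_count : List Int) : Prop :=
  (word.toList.all (fun ch =>
    decide (PySem.Raise.InRange fre_count.length ((ch.toNat : Int) - 97)))) = true
instance (word : String) (fre_count : List Int) : Decidable (Pre_check_word_in_limit_of_freq word fre_count) := by
  unfold Pre_check_word_in_limit_of_freq; infer_instance

def pvWitness_check_word_in_limit_of_freq : String × List Int := ("aba", [2, 1, 0])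

def Spec_check_word_in_limit_of_freq (word : String) (fre_count : List Int) (out : Bool) : Prop := out = check_word_in_limit_of_freq_alt word fre_count
instance (word : String) (fre_count : List Int) (out : Bool) : Decidable (Spec_check_word_in_limit_of_freq word fre_count out) := by unfold Spec_check_word_in_limit_of_freq; infer_instance

-- ===== CLAIM (what is proved, stated in full; the proofs are below) =====
def Claim_equal_check_word_in_limit_of_freq : Prop := ∀ (word : String) (fre_count : List Int), Dom_check_word_in_limit_of_freq word fre_count → Pre_check_word_in_limit_of_freq word fre_count → Spec_check_word_in_limit_of_freq word fre_count (check_word_in_limit_of_freq word fre_count)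

-- ===== LEMMAS AND PROOFS =====

-- the Nat position Python's (possibly negative) in-range index i denotes in a list of length n
def pvSlot (n : Nat) (i : Int) : Nat := if 0 ≤ i then i.toNat else n - (-i).toNat

theorem pvSlot_lt (n : Nat) (i : Int) (h : PySem.Raise.InRange n i) : pvSlot n i < n := by
  obtain ⟨h1, h2⟩ := h; unfold pvSlot; split <;> omega

theorem pvIdx?_eq (n : Nat) (i : Int) (h : PySem.Raise.InRange n i) :
    PySem.List.pyIdx? n i = some (pvSlot n i) := by
  obtain ⟨h1, h2⟩ := h
  unfold PySem.List.pyIdx? pvSlot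
  split <;> simp <;> omega

theorem pvGetD_eq (l : List Int) (i : Int) (d : Int) (h : PySem.Raise.InRange l.length i) :
    PySem.List.pyGetD l i d = l.getD (pvSlot l.length i) d := by
  unfold PySem.List.pyGetD PySem.List.pyGet?
  rw [pvIdx?_eq _ _ h]
  simp [List.getD, List.getElem?_eq_getElem (pvSlot_lt _ _ h)]

theorem pvSetD_eq (l : List Int) (i : Int) (v : Int) (h : PySem.Raise.InRange l.length i) :
    PySem.List.pySetD l i v = l.set (pvSlot l.length i) v := by
  unfold PySem.List.pySetD PySem.List.pySet?
  rw [pvIdx?_eq _ _ h]; rfl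

-- the slot a character touches in a list of length n
def pvCSlot (n : Nat) (ch : Char) : Nat := pvSlot n ((ch.toNat : Int) - 97)

-- getD of set at in-range positions
theorem pv_getD_set (l : List Int) (j s : Nat) (v d : Int) (hj : j < l.length) :
    (l.set j v).getD s d = if s = j then v else l.getD s d := by
  by_cases h : s = j
  · subst h; simp [List.getD, List.getElem?_set_self, hj]
  · simp [List.getD, List.getElem?_set_ne (fun hh => h hh.symm), h]

-- splitting a countP by equality with a fixed element
theorem pv_countP_split (cs : List Char) (p : Char → Bool) (k : Char) :
    cs.countP p = (cs.filter (fun c => !(c == k))).countP p + (if p k then cs.count k else 0) := by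
  induction cs with
  | nil => simp
  | cons c rest ih =>
    by_cases hck : c = k
    · subst hck
      by_cases hp : p c <;> simp [List.countP_cons, List.count_cons, List.filter_cons, hp, ih] <;> omega
    · have : (c == k) = false := by simp [hck]
      by_cases hp : p c <;>
        simp [List.countP_cons, List.count_cons, List.filter_cons, this, hp, hck, ih] <;> omega

-- grouping: the number of characters of cs hitting slot s equals the sum, over a nodup
-- cover ks of cs, of (count of k in cs) for those k hitting slot s
theorem pv_group (n : Nat) (ks cs : List Char) (s : Nat)
    (hnd : ks.Nodup) (hcov : ∀ c ∈ cs, c ∈ ks) :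
    (cs.countP (fun c => pvCSlot n c == s) : Int)
      = (ks.map (fun k => if pvCSlot n k = s then (cs.count k : Int) else 0)).sum := by
  induction ks generalizing cs with
  | nil =>
    have : cs = [] := by
      cases cs with
      | nil => rfl
      | cons a t => exact absurd (hcov a (by simp)) (by simp)
    simp [this]
  | cons k ks' ih =>
    have hnd' : ks'.Nodup := (List.nodup_cons.mp hnd).2
    have hk : k ∉ ks' := (List.nodup_cons.mp hnd).1
    have hcov' : ∀ c ∈ cs.filter (fun c => !(c == k)), c ∈ ks' := by
      intro c hc
      have hm := List.mem_of_mem_filter hc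
      have hne : ¬(c == k) = true := by
        have := List.of_mem_filter hc; simpa using this
      rcases List.mem_cons.mp (hcov c hm) with h | h
      · exact absurd (by simp [h]) hne
      · exact h
    have key := ih (cs.filter (fun c => !(c == k))) hnd' hcov'
    have hcount : ∀ k' ∈ ks', (cs.filter (fun c => !(c == k))).count k' = cs.count k' := by
      intro k' hk'
      have hkk : k' ≠ k := fun h => hk (h ▸ hk')
      simp [List.count_eq_countP, List.countP_filter]
      congr 1
      funext c
      by_cases h : c = k' <;> simp [h, hkk]
    have hsum : (ks'.map (fun k' => if pvCSlot n k' = s then ((cs.filter (fun c => !(c == k))).count k' : Int) else 0)).sum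
        = (ks'.map (fun k' => if pvCSlot n k' = s then (cs.count k' : Int) else 0)).sum := by
      congr 1
      apply List.map_congr_left
      intro k' hk'
      rw [hcount k' hk']
    rw [List.map_cons, List.sum_cons, ← hsum, ← key,
        pv_countP_split cs (fun c => pvCSlot n c == s) k]
    by_cases h : pvCSlot n k = s <;> simp [h] <;> push_cast <;> ring

-- characterization of A's fold
theorem pvA_char (cs : List Char) (f : Bool) (l : List Int)
    (h : ∀ ch ∈ cs, PySem.Raise.InRange l.length ((ch.toNat : Int) - 97)) :
    (cs.foldl pvAStep (f, l)).1
      = (f && decide (∀ ch ∈ cs,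
          (cs.countP (fun c => pvCSlot l.length c == pvCSlot l.length ch) : Int)
            ≤ l.getD (pvCSlot l.length ch) 0)) := by
  induction cs generalizing f l with
  | nil => simp
  | cons c rest ih =>
    have hc : PySem.Raise.InRange l.length ((c.toNat : Int) - 97) := h c (by simp)
    have hs0 : pvCSlot l.length c < l.length := pvSlot_lt _ _ hc
    rw [List.foldl_cons]
    have hstep : pvAStep (f, l) c
        = (f && decide (0 < l.getD (pvCSlot l.length c) 0),
           l.set (pvCSlot l.length c) (l.getD (pvCSlot l.length c) 0 - 1)) := by
      simp only [pvAStep, pvGetD_eq _ _ _ hc, pvSetD_eq _ _ _ hc, pvCSlot]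
      congr 1
      by_cases hv : l.getD (pvSlot l.length ((c.toNat : Int) - 97)) 0 ≤ 0
      · rw [if_pos hv, decide_eq_false (by omega), Bool.and_false]
      · rw [if_neg hv, decide_eq_true (by omega), Bool.and_true]
    have hrest : ∀ ch ∈ rest, PySem.Raise.InRange
        (l.set (pvCSlot l.length c) (l.getD (pvCSlot l.length c) 0 - 1)).length
        ((ch.toNat : Int) - 97) := by
      intro ch hch
      rw [List.length_set]
      exact h ch (List.mem_cons_of_mem _ hch)
    rw [hstep, ih _ _ hrest]
    simp only [List.length_set]
    rw [Bool.and_assoc, ← Bool.decide_and]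
    refine congrArg (f && ·) (decide_eq_decide.mpr ?_)
    constructor
    · rintro ⟨hv, hP'⟩ ch hch
      have hset : ∀ s, (l.set (pvCSlot l.length c) (l.getD (pvCSlot l.length c) 0 - 1)).getD s 0
          = if s = pvCSlot l.length c then l.getD (pvCSlot l.length c) 0 - 1 else l.getD s 0 :=
        fun s => pv_getD_set l (pvCSlot l.length c) s _ 0 hs0
      rcases List.mem_cons.mp hch with rfl | hch
      · -- ch = c
        rw [List.countP_cons]
        simp only [beq_self_eq_true, if_pos rfl, decide_true, if_true]
        by_cases hex : ∃ ch' ∈ rest, pvCSlot l.length ch' = pvCSlot l.length ch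
        · obtain ⟨ch', hch', hsl⟩ := hex
          have := hP' ch' hch'
          rw [hset, if_pos hsl, hsl] at this
          have hcnteq : rest.countP (fun q => pvCSlot l.length q == pvCSlot l.length ch')
              = rest.countP (fun q => pvCSlot l.length q == pvCSlot l.length ch) := by
            rw [hsl]
          omega
        · have hz : rest.countP (fun q => pvCSlot l.length q == pvCSlot l.length ch) = 0 := by
            rw [List.countP_eq_zero]
            intro a ha
            simp only [beq_iff_eq]
            exact fun hh => hex ⟨a, ha, hh⟩
          omega
      · -- ch ∈ rest
        have := hP' ch hch
        rw [hset] at this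
        rw [List.countP_cons]
        by_cases hsl : pvCSlot l.length ch = pvCSlot l.length c
        · rw [if_pos hsl] at this
          simp only [beq_iff_eq, hsl.symm, if_pos rfl, decide_true, if_true]
          rw [hsl] at this ⊢
          omega
        · rw [if_neg hsl] at this
          have : (if (pvCSlot l.length c == pvCSlot l.length ch) = true then 1 else 0) = 0 := by
            simp only [beq_iff_eq]
            exact if_neg (fun hh => hsl hh.symm)
          omega
    · intro hP
      have hcnt0 := hP c (by simp)
      rw [List.countP_cons] at hcnt0
      simp only [beq_self_eq_true, if_pos rfl, decide_true, if_true] at hcnt0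
      refine ⟨by omega, ?_⟩
      intro ch hch
      have := hP ch (List.mem_cons_of_mem _ hch)
      rw [List.countP_cons] at this
      rw [pv_getD_set l (pvCSlot l.length c) _ _ 0 hs0]
      by_cases hsl : pvCSlot l.length ch = pvCSlot l.length c
      · rw [if_pos hsl]
        simp only [beq_iff_eq, hsl.symm, if_pos rfl, decide_true, if_true] at this
        rw [hsl] at this ⊢
        omega
      · rw [if_neg hsl]
        have hz : (if (pvCSlot l.length c == pvCSlot l.length ch) = true then 1 else 0) = 0 := by
          simp only [beq_iff_eq]
          exact if_neg (fun hh => hsl hh.symm)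
        omega

-- characterization of B's fold
theorem pvB_char (ps : List (Char × Int)) (f : Bool) (l : List Int)
    (h : ∀ p ∈ ps, PySem.Raise.InRange l.length ((p.1.toNat : Int) - 97))
    (hpos : ∀ p ∈ ps, 0 ≤ p.2) :
    (ps.foldl pvBStep (f, l)).1
      = (f && decide (∀ p ∈ ps,
          (ps.map (fun q => if pvCSlot l.length q.1 = pvCSlot l.length p.1 then q.2 else 0)).sum
            ≤ l.getD (pvCSlot l.length p.1) 0)) := by
  induction ps generalizing f l with
  | nil => simp
  | cons p0 rest ih =>
    have hc : PySem.Raise.InRange l.length ((p0.1.toNat : Int) - 97) := h p0 (by simp)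
    have hs0 : pvCSlot l.length p0.1 < l.length := pvSlot_lt _ _ hc
    rw [List.foldl_cons]
    have hstep : pvBStep (f, l) p0
        = (f && decide (p0.2 ≤ l.getD (pvCSlot l.length p0.1) 0),
           l.set (pvCSlot l.length p0.1) (l.getD (pvCSlot l.length p0.1) 0 - p0.2)) := by
      simp only [pvBStep, pvGetD_eq _ _ _ hc, pvSetD_eq _ _ _ hc, pvCSlot]
      congr 1
      by_cases hv : l.getD (pvSlot l.length ((p0.1.toNat : Int) - 97)) 0 < p0.2
      · rw [if_pos hv, decide_eq_false (by omega), Bool.and_false]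
      · rw [if_neg hv, decide_eq_true (by omega), Bool.and_true]
    have hrest : ∀ p ∈ rest, PySem.Raise.InRange
        (l.set (pvCSlot l.length p0.1) (l.getD (pvCSlot l.length p0.1) 0 - p0.2)).length
        ((p.1.toNat : Int) - 97) := by
      intro p hp
      rw [List.length_set]
      exact h p (List.mem_cons_of_mem _ hp)
    rw [hstep, ih _ _ hrest (fun p hp => hpos p (List.mem_cons_of_mem _ hp))]
    simp only [List.length_set]
    rw [Bool.and_assoc, ← Bool.decide_and]
    refine congrArg (f && ·) (decide_eq_decide.mpr ?_)
    have hset : ∀ s, (l.set (pvCSlot l.length p0.1) (l.getD (pvCSlot l.length p0.1) 0 - p0.2)).getD s 0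
        = if s = pvCSlot l.length p0.1 then l.getD (pvCSlot l.length p0.1) 0 - p0.2 else l.getD s 0 :=
      fun s => pv_getD_set l (pvCSlot l.length p0.1) s _ 0 hs0
    have hSnonneg : ∀ s, 0 ≤ (rest.map (fun q => if pvCSlot l.length q.1 = s then q.2 else 0)).sum := by
      intro s
      apply List.sum_nonneg
      intro x hx
      obtain ⟨q, hq, rfl⟩ := List.mem_map.mp hx
      by_cases hq' : pvCSlot l.length q.1 = s
      · rw [if_pos hq']; exact hpos q (List.mem_cons_of_mem _ hq)
      · rw [if_neg hq']
    constructor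
    · rintro ⟨hv, hP'⟩ p hp
      rcases List.mem_cons.mp hp with rfl | hp
      · rw [List.map_cons, List.sum_cons, if_pos rfl]
        by_cases hex : ∃ p' ∈ rest, pvCSlot l.length p'.1 = pvCSlot l.length p.1
        · obtain ⟨p', hp', hsl⟩ := hex
          have := hP' p' hp'
          rw [hset, if_pos hsl, hsl] at this
          omega
        · have hz : (rest.map (fun q => if pvCSlot l.length q.1 = pvCSlot l.length p.1 then q.2 else 0)).sum = 0 := by
            apply List.sum_eq_zero
            intro x hx
            obtain ⟨q, hq, rfl⟩ := List.mem_map.mp hx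
            exact if_neg (fun hh => hex ⟨q, hq, hh⟩)
          omega
      · have := hP' p hp
        rw [hset] at this
        rw [List.map_cons, List.sum_cons]
        by_cases hsl : pvCSlot l.length p.1 = pvCSlot l.length p0.1
        · rw [if_pos hsl] at this
          rw [hsl] at this ⊢
          rw [if_pos rfl]
          omega
        · rw [if_neg hsl] at this
          rw [if_neg (fun hh => hsl hh.symm)]
          omega
    · intro hP
      have h0 := hP p0 (by simp)
      rw [List.map_cons, List.sum_cons, if_pos rfl] at h0
      have hS0 := hSnonneg (pvCSlot l.length p0.1)
      refine ⟨by omega, ?_⟩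
      intro p hp
      have := hP p (List.mem_cons_of_mem _ hp)
      rw [List.map_cons, List.sum_cons] at this
      rw [hset]
      by_cases hsl : pvCSlot l.length p.1 = pvCSlot l.length p0.1
      · rw [if_pos hsl]
        rw [hsl] at this ⊢
        rw [if_pos rfl] at this
        omega
      · rw [if_neg hsl]
        rw [if_neg (fun hh => hsl hh.symm)] at this
        omega

-- ===== VERDICT (by name: the statement is the Claim_ definition above) =====
theorem check_word_in_limit_of_freq_spec : Claim_equal_check_word_in_limit_of_freq := by
  intro word fre _hdom hpre0
  have hpre : ∀ ch ∈ word.toList, PySem.Raise.InRange fre.length ((ch.toNat : Int) - 97) := by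
    unfold Pre_check_word_in_limit_of_freq at hpre0
    simpa using hpre0
  unfold Spec_check_word_in_limit_of_freq check_word_in_limit_of_freq check_word_in_limit_of_freq_alt
  have hitems : (pvBCounter word.toList).items
      = (PySem.Set.ofList word.toList).map (fun k => (k, (word.toList.count k : Int))) := by
    unfold pvBCounter
    rw [PySem.Dict.foldl_insert_getD_add_one_eq_counter, PySem.Dict.items_counter]
  rw [pvA_char word.toList true fre hpre, hitems]
  rw [pvB_char _ true fre ?hr ?hp]
  case hr =>
    intro p hp
    obtain ⟨k, hk, rfl⟩ := List.mem_map.mp hp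
    exact hpre k ((PySem.Set.mem_ofList _ _).mp hk)
  case hp =>
    intro p hp
    obtain ⟨k, hk, rfl⟩ := List.mem_map.mp hp
    exact Int.natCast_nonneg _
  simp only [Bool.true_and]
  apply decide_eq_decide.mpr
  have hS : ∀ s : Nat,
      (((PySem.Set.ofList word.toList).map (fun k => (k, (word.toList.count k : Int)))).map
        (fun q => if pvCSlot fre.length q.1 = s then q.2 else 0)).sum
      = (word.toList.countP (fun c => pvCSlot fre.length c == s) : Int) := by
    intro s
    rw [List.map_map]
    exact (pv_group fre.length (PySem.Set.ofList word.toList) word.toList s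
      (PySem.Set.nodup_ofList _) (fun c hc => (PySem.Set.mem_ofList _ _).mpr hc)).symm
  constructor
  · intro hA p hp
    obtain ⟨k, hk, rfl⟩ := List.mem_map.mp hp
    rw [hS]
    exact hA k ((PySem.Set.mem_ofList _ _).mp hk)
  · intro hB ch hch
    have := hB (ch, (word.toList.count ch : Int))
      (List.mem_map.mpr ⟨ch, (PySem.Set.mem_ofList _ _).mpr hch, rfl⟩)
    rw [hS] at this
    exact this
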